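-- pv_equiv track=rewrite | github.com/AsciiBunny/AdventOfCode | 2023/14/day14.py | get_left_weight
-- ===== SOURCE A (Python) =====
-- def get_left_weight(field: list[str]):
--     field_width = len(field[0])
--     total_weight = 0
--     for row in field:
--         for i, character in enumerate(row):
--             if character == "O":
--                 total_weight += field_width - i
--     return total_weight
-- ===== SOURCE B (Python) =====
-- def get_left_weight(field: list[str]):
--     width = len(field[0])
--     depth = 0
--     for row in field:
--         if len(row) > depth:
--             depth = len(row)
--     total = 0
--     for i in range(depth):
--         count = 0
--         for row in field:
--             if i < len(row) and row[i] == "O":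
--                 count += 1
--         total += count * (width - i)
--     return total
-- ===== Notes on version B (the rewrite author's own statement) =====
-- stated objective: alternative
-- what changed: B traverses the grid column-major: it finds the longest row, then for each column index counts the 'O's in that column across all rows and adds count*(width-i), instead of A's row-major char-by-char accumulation.
import Mathlib
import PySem

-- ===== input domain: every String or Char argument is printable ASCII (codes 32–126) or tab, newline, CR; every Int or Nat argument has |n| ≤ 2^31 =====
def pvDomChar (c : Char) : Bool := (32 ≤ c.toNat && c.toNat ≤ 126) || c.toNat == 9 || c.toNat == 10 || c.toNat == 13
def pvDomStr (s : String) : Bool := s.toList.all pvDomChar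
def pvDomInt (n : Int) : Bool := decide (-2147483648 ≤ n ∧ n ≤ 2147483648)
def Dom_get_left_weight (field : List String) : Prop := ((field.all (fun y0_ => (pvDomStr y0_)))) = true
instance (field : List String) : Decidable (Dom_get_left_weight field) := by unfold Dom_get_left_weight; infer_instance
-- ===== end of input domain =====

-- B traverses the grid column-major (per column, count the 'O's across all rows, weight once)
-- instead of A's row-major char-by-char accumulation; objective: alternative (same cost).

-- ===== PORT A =====
def get_left_weight (field : List String) : Int :=
  let field_width : Int := PySem.Str.len ((PySem.List.pyGet? field 0).getD "")
  field.foldl (fun total row =>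
    (PySem.List.enumerate row.toList 0).foldl
      (fun total p => if p.2 = 'O' then total + (field_width - p.1) else total) total) 0

-- ===== PORT B =====
def get_left_weight_alt (field : List String) : Int :=
  let width : Int := PySem.Str.len ((PySem.List.pyGet? field 0).getD "")
  let depth : Int :=
    field.foldl (fun d row => if PySem.Str.len row > d then PySem.Str.len row else d) 0
  (PySem.List.pyRange 0 depth 1).foldl (fun total i =>
    let count : Int := field.foldl (fun c row =>
      if i < PySem.Str.len row then
        if PySem.Str.pyGet? row i = some 'O' then c + 1 else c
      else c) 0
    total + count * (width - i)) 0

-- ===== PRECONDITION & SPEC =====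
-- Pre_ excludes only the empty list, on which A raises IndexError at field[0] (B raises there too).
def Pre_get_left_weight (field : List String) : Prop := field ≠ []
instance (field : List String) : Decidable (Pre_get_left_weight field) := by
  unfold Pre_get_left_weight; infer_instance

def pvWitness_get_left_weight : List String := ["O.O", ".O"]

def Spec_get_left_weight (field : List String) (out : Int) : Prop := out = get_left_weight_alt field
instance (field : List String) (out : Int) : Decidable (Spec_get_left_weight field out) := by
  unfold Spec_get_left_weight; infer_instance

-- ===== CLAIM (what is proved, stated in full; the proofs are below) =====
def Claim_equal_get_left_weight : Prop := ∀ (field : List String), Dom_get_left_weight field → Pre_get_left_weight field → Spec_get_left_weight field (get_left_weight field)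

-- ===== LEMMAS AND PROOFS =====

-- weight contributed by character position k of a row (0 when out of range or not 'O')
def pvF (w : Int) (cs : List Char) (k : Nat) : Int :=
  if cs.getD k ' ' = 'O' then w - (k : Int) else 0

theorem pvF_zero (w : Int) (cs : List Char) (k : Nat) (h : cs.length ≤ k) : pvF w cs k = 0 := by
  unfold pvF
  rw [List.getD_eq_default _ _ h]
  simp

theorem pyRange01 (n : Nat) :
    PySem.List.pyRange 0 (n : Int) 1 = (List.range n).map (fun (k : Nat) => (k : Int)) := by
  rw [PySem.List.pyRange_of_pos 0 (n : Int) (by norm_num)]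
  rcases n with _ | m
  · simp
  · norm_num

-- A's inner loop over one row, as a sum over character positions
theorem pvA_inner (w : Int) (cs : List Char) (acc : Int) :
    (PySem.List.enumerate cs 0).foldl
      (fun total p => if p.2 = 'O' then total + (w - p.1) else total) acc
    = acc + ((List.range cs.length).map (pvF w cs)).sum := by
  rw [PySem.List.foldl_congr_mem _ _
    (fun total (p : Int × Char) => total + (if p.2 = 'O' then w - p.1 else 0)) acc
    (by intro t p _; by_cases h : p.2 = 'O' <;> simp [h])]
  rw [PySem.List.foldl_add]
  congr 1
  rw [PySem.List.enumerate_eq_map_pyRange cs ' ', List.map_map]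
  have hlen : PySem.List.len cs = ((cs.length : Nat) : Int) := by
    simp [PySem.List.len]
  rw [hlen, pyRange01, List.map_map]
  apply congrArg
  apply List.map_congr_left
  intro k hk
  have hk' : k < cs.length := List.mem_range.mp hk
  simp only [Function.comp]
  rw [PySem.List.pyGetD_natCast]
  unfold pvF
  rfl

-- A as a double sum (rows, then positions)
theorem pvA_eq (field : List String) (w : Int) :
    field.foldl (fun total row =>
      (PySem.List.enumerate row.toList 0).foldl
        (fun total p => if p.2 = 'O' then total + (w - p.1) else total) total) 0
    = (field.map (fun row =>
        ((List.range row.toList.length).map (pvF w row.toList)).sum)).sum := by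
  rw [PySem.List.foldl_congr_mem _ _
    (fun total row => total + ((List.range row.toList.length).map (pvF w row.toList)).sum) 0
    (by intro acc row _; rw [pvA_inner])]
  rw [PySem.List.foldl_add]
  simp

-- the foldl-max is ≥ its start and ≥ every row length
theorem pvDepth_ge (field : List String) : ∀ (d : Int),
    d ≤ field.foldl (fun d row => if PySem.Str.len row > d then PySem.Str.len row else d) d ∧
    ∀ row ∈ field, PySem.Str.len row ≤
      field.foldl (fun d row => if PySem.Str.len row > d then PySem.Str.len row else d) d := by
  induction field with
  | nil => intro d; simp
  | cons r t ih =>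
    intro d
    have h1 := (ih (if PySem.Str.len r > d then PySem.Str.len r else d)).1
    constructor
    · simp only [List.foldl_cons]
      by_cases hc : PySem.Str.len r > d
      · rw [if_pos hc] at h1 ⊢; omega
      · rw [if_neg hc] at h1 ⊢; omega
    · intro row hrow
      simp only [List.foldl_cons]
      rcases List.mem_cons.mp hrow with h | h
      · subst h
        by_cases hc : PySem.Str.len row > d
        · rw [if_pos hc] at h1 ⊢; omega
        · rw [if_neg hc] at h1 ⊢; omega
      · exact (ih _).2 row h

-- truncate a sum over range n to range m when the tail vanishes
theorem pvTruncate (g : Nat → Int) (m : Nat) (h0 : ∀ k, m ≤ k → g k = 0) :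
    ∀ (n : Nat), m ≤ n →
    ((List.range n).map g).sum = ((List.range m).map g).sum := by
  intro n
  induction n with
  | zero => intro h; interval_cases m; rfl
  | succ n ih =>
    intro h
    rcases Nat.lt_or_ge m (n + 1) with hlt | hge
    · have hmn : m ≤ n := by omega
      rw [List.range_succ, List.map_append, List.sum_append, ih hmn]
      simp [h0 n hmn]
    · have : m = n + 1 := by omega
      subst this; rfl

-- exchange a sum over rows with a sum over range n
theorem pvExchange {α : Type} (rows : List α) (n : Nat) (h : α → Nat → Int) :
    ((List.range n).map (fun k => (rows.map (fun r => h r k)).sum)).sum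
    = (rows.map (fun r => ((List.range n).map (h r)).sum)).sum := by
  induction rows with
  | nil => simp
  | cons x t ih =>
    simp only [List.map_cons, List.sum_cons]
    rw [← ih, ← PySem.List.sum_map_add_int]

-- B's per-column count, as a sum of 0/1 indicators
theorem pvCount_eq (field : List String) (i : Int) :
    field.foldl (fun c row =>
      if i < PySem.Str.len row then
        if PySem.Str.pyGet? row i = some 'O' then c + 1 else c
      else c) 0
    = (field.map (fun row =>
        if i < PySem.Str.len row ∧ PySem.Str.pyGet? row i = some 'O' then (1:Int) else 0)).sum := by
  rw [PySem.List.foldl_congr_mem _ _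
    (fun c row => c + (if i < PySem.Str.len row ∧ PySem.Str.pyGet? row i = some 'O'
      then (1:Int) else 0)) 0
    (by intro acc row _; split_ifs <;> simp_all)]
  rw [PySem.List.foldl_add]
  simp

-- B's column term at index k equals pvF pointwise, for every k
theorem pvInd_eq (w : Int) (row : String) (k : Nat) :
    (if (k : Int) < PySem.Str.len row ∧ PySem.Str.pyGet? row (k : Int) = some 'O'
      then (1:Int) else 0) * (w - (k : Int)) = pvF w row.toList k := by
  rw [PySem.Str.len_eq, PySem.Str.pyGet?_eq]
  rcases Nat.lt_or_ge k row.toList.length with hk | hk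
  · have hget : PySem.Chars.pyGet? row.toList (k : Int) = row.toList[k]? := by
      simp [PySem.Chars.pyGet?]
    rw [hget, List.getElem?_eq_getElem hk]
    unfold pvF
    rw [List.getD_eq_getElem _ _ hk]
    by_cases hO : row.toList[k] = 'O'
    · rw [if_pos ⟨by exact_mod_cast hk, by rw [hO]⟩, if_pos hO]; ring
    · rw [if_neg (by rintro ⟨_, h2⟩; exact hO (by injection h2)), if_neg hO]; ring
  · have hnot : ¬(((k : Nat) : Int) < ((row.toList.length : Nat) : Int) ∧
        PySem.Chars.pyGet? row.toList ((k : Nat) : Int) = some 'O') := by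
      rintro ⟨h1, _⟩
      have : k < row.toList.length := by exact_mod_cast h1
      omega
    rw [pvF_zero _ _ _ hk, if_neg hnot]
    ring

-- B as the same double sum, via sum exchange and tail truncation
theorem pvB_sum (field : List String) (w d : Int) (h0 : 0 ≤ d)
    (hrow : ∀ row ∈ field, PySem.Str.len row ≤ d) :
    (PySem.List.pyRange 0 d 1).foldl (fun total i =>
      total + (field.foldl (fun c row =>
        if i < PySem.Str.len row then
          if PySem.Str.pyGet? row i = some 'O' then c + 1 else c
        else c) 0) * (w - i)) 0
    = (field.map (fun row =>
        ((List.range row.toList.length).map (pvF w row.toList)).sum)).sum := by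
  obtain ⟨n, rfl⟩ : ∃ n : Nat, d = (n : Int) := ⟨d.toNat, by omega⟩
  rw [pyRange01, List.foldl_map, PySem.List.foldl_add, zero_add]
  have hstep : (List.range n).map (fun k =>
      (field.foldl (fun c row =>
        if ((k : Nat) : Int) < PySem.Str.len row then
          if PySem.Str.pyGet? row ((k : Nat) : Int) = some 'O' then c + 1 else c
        else c) 0) * (w - ((k : Nat) : Int)))
    = (List.range n).map (fun k => (field.map (fun row => pvF w row.toList k)).sum) := by
    apply List.map_congr_left
    intro k _
    rw [pvCount_eq, ← List.sum_map_mul_right]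
    apply congrArg
    apply List.map_congr_left
    intro row _
    simpa using pvInd_eq w row k
  rw [hstep, pvExchange]
  apply congrArg
  apply List.map_congr_left
  intro row hmem
  have hlen : row.toList.length ≤ n := by
    have := hrow row hmem
    rw [PySem.Str.len_eq] at this
    exact_mod_cast this
  exact pvTruncate (pvF w row.toList) row.toList.length
    (fun k hk => pvF_zero w row.toList k hk) n hlen

-- ===== VERDICT (by name: the statement is the Claim_ definition above) =====
theorem get_left_weight_spec : Claim_equal_get_left_weight := by
  intro field _ _
  show get_left_weight field = get_left_weight_alt field
  have hdge := pvDepth_ge field 0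
  exact (pvA_eq field _).trans (pvB_sum field _ _ hdge.1 hdge.2).symm
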